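-- pv_equiv track=rewrite | github.com/lauberna/Laureano-Berna-Programacion1 | functions/Functions.py | win_col
-- ===== SOURCE A (Python) =====
-- def win_col(carton):
--     for i in range(len(carton)):
--         col_true = 0
--         for j in range(len(carton)):
--             if carton[j][i] == "X":
--                 col_true += 1
--             if col_true == 5:
--                 return i
-- ===== SOURCE B (Python) =====
-- def win_col(carton):
--     n = len(carton)
--     counts = [0] * n
--     for row in carton:
--         for i in range(n):
--             if row[i] == "X":
--                 counts[i] += 1
--     for i in range(n):
--         if counts[i] >= 5:
--             return i
-- ===== Notes on version B (the rewrite author's own statement) =====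
-- stated objective: alternative
-- what changed: B inverts the loop nesting: one pass over the rows accumulating a per-column count vector, then a scan of that vector for the first column with >= 5 X marks, instead of A's per-column early-exit counter that rescans every row for every column.
-- outside the precondition, e.g. on win_col([['X'], ['X'], ['X'], ['X'], ['X']]): A returns 0, B raises IndexError
import Mathlib
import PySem

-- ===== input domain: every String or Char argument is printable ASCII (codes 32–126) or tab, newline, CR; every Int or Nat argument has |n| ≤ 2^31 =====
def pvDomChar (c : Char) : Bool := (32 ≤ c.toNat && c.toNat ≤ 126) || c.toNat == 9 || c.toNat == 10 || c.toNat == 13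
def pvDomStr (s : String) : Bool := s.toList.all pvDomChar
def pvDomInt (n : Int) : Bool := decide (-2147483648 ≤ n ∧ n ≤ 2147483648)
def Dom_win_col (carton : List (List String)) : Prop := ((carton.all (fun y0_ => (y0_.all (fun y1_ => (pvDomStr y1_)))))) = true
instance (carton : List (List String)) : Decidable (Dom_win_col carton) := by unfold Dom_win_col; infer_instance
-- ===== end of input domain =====

-- B inverts the loop nesting: one pass over the rows accumulating a per-column count
-- vector, then a scan for the first column with ≥ 5 "X" marks (objective: alternative).

-- ===== PORT A =====
-- inner 'for j' loop of A: walks the rows keeping col_true, early return on == 5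
def winColJ (i : Nat) (c : Int) : List (List String) → Option Int
  | [] => none
  | row :: rest =>
      let c' := if (PySem.List.pyGet? row (Int.ofNat i)).getD "" = "X" then c + 1 else c
      if c' = 5 then some (Int.ofNat i) else winColJ i c' rest

-- outer 'for i' loop of A over range(len(carton))
def winColOuter (carton : List (List String)) : List Nat → Option Int
  | [] => none
  | i :: is =>
      match winColJ i 0 carton with
      | some r => some r
      | none => winColOuter carton is

def win_col (carton : List (List String)) : Option Int :=
  winColOuter carton (List.range carton.length)

-- ===== PORT B =====
-- 'for i in range(n): if row[i] == "X": counts[i] += 1'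
def winColAltRow (n : Nat) (cs : List Int) (row : List String) : List Int :=
  (List.range n).foldl
    (fun cs i =>
      if (PySem.List.pyGet? row (Int.ofNat i)).getD "" = "X" then cs.set i (cs.getD i 0 + 1) else cs)
    cs

-- final 'for i in range(n): if counts[i] >= 5: return i'
def winColAltScan : Nat → List Int → Option Int
  | _, [] => none
  | i, c :: cs => if 5 ≤ c then some (Int.ofNat i) else winColAltScan (i + 1) cs

def win_col_alt (carton : List (List String)) : Option Int :=
  let n := carton.length
  let counts := carton.foldl (winColAltRow n) (List.replicate n 0)
  winColAltScan 0 counts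

-- ===== PRECONDITION & SPEC =====
-- Pre_ excludes the non-rectangular cartons (some row shorter than the number of rows), on
-- which both Pythons raise IndexError — except for rare early-return cases of A, excluded too.
def Pre_win_col (carton : List (List String)) : Prop :=
  ∀ row ∈ carton, carton.length ≤ row.length
instance (carton : List (List String)) : Decidable (Pre_win_col carton) := by
  unfold Pre_win_col; infer_instance

def pvWitness_win_col : List (List String) := [["X", "O"], ["O", "X"]]

def Spec_win_col (carton : List (List String)) (out : Option Int) : Prop := out = win_col_alt carton
instance (carton : List (List String)) (out : Option Int) : Decidable (Spec_win_col carton out) := by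
  unfold Spec_win_col; infer_instance

-- ===== CLAIM (what is proved, stated in full; the proofs are below) =====
def Claim_equal_win_col : Prop := ∀ (carton : List (List String)), Dom_win_col carton → Pre_win_col carton → Spec_win_col carton (win_col carton)

-- ===== LEMMAS AND PROOFS =====

-- number of rows whose i-th entry is "X" (the shared specification of both ports)
def countX (rows : List (List String)) (i : Nat) : Nat :=
  rows.countP (fun row => decide ((PySem.List.pyGet? row (Int.ofNat i)).getD "" = "X"))

theorem countX_cons (row : List String) (rest : List (List String)) (i : Nat) :
    countX (row :: rest) i
      = countX rest i
        + (if (PySem.List.pyGet? row (Int.ofNat i)).getD "" = "X" then 1 else 0) := by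
  unfold countX
  rw [List.countP_cons]
  congr 1
  split_ifs with h h2 h2
  · rfl
  · exact absurd (of_decide_eq_true h) h2
  · exact absurd (decide_eq_true h2) h
  · rfl

theorem winColJ_eq (i : Nat) :
    ∀ (rows : List (List String)) (c : Int), 0 ≤ c → c < 5 →
      winColJ i c rows = if 5 ≤ c + (countX rows i : Int) then some (Int.ofNat i) else none := by
  intro rows
  induction rows with
  | nil =>
      intro c h0 h5
      simp only [winColJ, countX, List.countP_nil, Nat.cast_zero]
      rw [if_neg (by omega)]
  | cons row rest ih =>
      intro c h0 h5
      simp only [winColJ]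
      by_cases hx : (PySem.List.pyGet? row (Int.ofNat i)).getD "" = "X"
      · rw [if_pos hx, countX_cons, if_pos hx]
        by_cases h51 : c + 1 = 5
        · rw [if_pos h51, if_pos (by push_cast; omega)]
        · rw [if_neg h51, ih (c + 1) (by omega) (by omega)]
          by_cases h1 : 5 ≤ c + 1 + (countX rest i : Int)
          · rw [if_pos h1, if_pos (by push_cast at h1 ⊢; omega)]
          · rw [if_neg h1, if_neg (by push_cast at h1 ⊢; omega)]
      · rw [if_neg hx, countX_cons, if_neg hx, add_zero]
        rw [if_neg (by omega : ¬ c = 5), ih c h0 h5]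

theorem winColOuter_eq (carton : List (List String)) :
    ∀ (is : List Nat),
      winColOuter carton is
        = (is.find? (fun i => decide (5 ≤ countX carton i))).map (fun i => (Int.ofNat i)) := by
  intro is
  induction is with
  | nil => simp [winColOuter]
  | cons i rest ih =>
      simp only [winColOuter, winColJ_eq i carton 0 (by omega) (by omega)]
      by_cases h : 5 ≤ countX carton i
      · rw [if_pos (by push_cast; omega)]
        rw [List.find?_cons_of_pos (by simpa using h)]
        rfl
      · rw [if_neg (by push_cast; omega)]
        rw [List.find?_cons_of_neg (by simpa using h)]
        exact ih

theorem winColAltRow_length (n : Nat) (row : List String) :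
    ∀ cs : List Int, (winColAltRow n cs row).length = cs.length := by
  induction n with
  | zero => intro cs; simp [winColAltRow]
  | succ n ih =>
      intro cs
      simp only [winColAltRow, List.range_succ, List.foldl_append, List.foldl_cons,
        List.foldl_nil]
      have h1 := ih cs
      simp only [winColAltRow] at h1
      split_ifs with h
      · rw [List.length_set]; exact h1
      · exact h1

theorem winColAltRow_getD (n : Nat) (row : List String) (j : Nat) :
    ∀ cs : List Int, n ≤ cs.length →
      (winColAltRow n cs row).getD j 0
        = cs.getD j 0
          + (if j < n ∧ (PySem.List.pyGet? row (Int.ofNat j)).getD "" = "X" then 1 else 0) := by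
  induction n with
  | zero =>
      intro cs _
      simp only [winColAltRow, List.range_zero, List.foldl_nil]
      rw [if_neg (by rintro ⟨h, _⟩; omega)]
      omega
  | succ n ih =>
      intro cs hn
      simp only [winColAltRow, List.range_succ, List.foldl_append, List.foldl_cons,
        List.foldl_nil]
      have hlen := winColAltRow_length n row cs
      simp only [winColAltRow] at hlen
      have hih := ih cs (by omega)
      simp only [winColAltRow] at hih
      set cs' := (List.range n).foldl
          (fun cs i => if (PySem.List.pyGet? row (Int.ofNat i)).getD "" = "X"
            then cs.set i (cs.getD i 0 + 1) else cs) cs with hcs'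
      by_cases hx : (PySem.List.pyGet? row (Int.ofNat n)).getD "" = "X"
      · rw [if_pos hx]
        rw [List.getD_eq_getElem?_getD, List.getElem?_set]
        by_cases hj : n = j
        · subst hj
          rw [if_pos rfl, if_pos (by omega), Option.getD_some, hih,
            if_neg (by rintro ⟨h, _⟩; omega), if_pos ⟨by omega, hx⟩]
          omega
        · rw [if_neg hj, ← List.getD_eq_getElem?_getD, hih]
          by_cases hcj : (PySem.List.pyGet? row (Int.ofNat j)).getD "" = "X"
          · by_cases hjn : j < n
            · rw [if_pos ⟨hjn, hcj⟩, if_pos ⟨by omega, hcj⟩]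
            · rw [if_neg (by rintro ⟨h, _⟩; exact hjn h),
                if_neg (by rintro ⟨h, _⟩; omega)]
          · rw [if_neg (by rintro ⟨_, h2⟩; exact hcj h2),
              if_neg (by rintro ⟨_, h2⟩; exact hcj h2)]
      · rw [if_neg hx, hih]
        by_cases hcj : (PySem.List.pyGet? row (Int.ofNat j)).getD "" = "X"
        · by_cases hjn : j < n
          · rw [if_pos ⟨hjn, hcj⟩, if_pos ⟨by omega, hcj⟩]
          · have hj : ¬ j = n := by
              intro h; exact hx (h ▸ hcj)
            rw [if_neg (by rintro ⟨h, _⟩; exact hjn h),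
              if_neg (by rintro ⟨h, _⟩; omega)]
        · rw [if_neg (by rintro ⟨_, h2⟩; exact hcj h2),
            if_neg (by rintro ⟨_, h2⟩; exact hcj h2)]

theorem counts_length (n : Nat) :
    ∀ (rows : List (List String)) (cs : List Int),
      (rows.foldl (winColAltRow n) cs).length = cs.length := by
  intro rows
  induction rows with
  | nil => intro cs; simp
  | cons row rest ih =>
      intro cs
      simp only [List.foldl_cons]
      rw [ih, winColAltRow_length]

theorem counts_getD (n : Nat) (j : Nat) (hj : j < n) :
    ∀ (rows : List (List String)) (cs : List Int), cs.length = n →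
      (rows.foldl (winColAltRow n) cs).getD j 0 = cs.getD j 0 + (countX rows j : Int) := by
  intro rows
  induction rows with
  | nil => intro cs _; simp [countX]
  | cons row rest ih =>
      intro cs hlen
      simp only [List.foldl_cons]
      rw [ih _ (by rw [winColAltRow_length]; exact hlen)]
      rw [winColAltRow_getD n row j cs (by omega), countX_cons]
      by_cases hx : (PySem.List.pyGet? row (Int.ofNat j)).getD "" = "X"
      · rw [if_pos ⟨hj, hx⟩, if_pos hx]
        push_cast
        ring
      · rw [if_neg (by rintro ⟨_, h2⟩; exact hx h2), if_neg hx]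
        omega

theorem winColAltScan_eq (carton : List (List String)) :
    ∀ (cs : List Int) (k : Nat),
      (∀ j, j < cs.length → cs.getD j 0 = (countX carton (k + j) : Int)) →
      winColAltScan k cs
        = ((List.range' k cs.length).find? (fun i => decide (5 ≤ countX carton i))).map
            (fun i => (Int.ofNat i)) := by
  intro cs
  induction cs with
  | nil => intro k _; simp [winColAltScan]
  | cons c rest ih =>
      intro k h
      have hc : c = (countX carton k : Int) := by
        have := h 0 (by simp)
        simpa using this
      simp only [winColAltScan, List.length_cons, List.range'_succ]
      by_cases h5 : 5 ≤ countX carton k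
      · rw [if_pos (by rw [hc]; exact_mod_cast h5)]
        rw [List.find?_cons_of_pos (by simpa using h5)]
        rfl
      · rw [if_neg (by rw [hc]; push_cast; omega)]
        rw [List.find?_cons_of_neg (by simpa using h5)]
        rw [ih (k + 1) ?_]
        intro j hj
        have h2 := h (j + 1) (by simpa using Nat.succ_lt_succ hj)
        simpa [show k + (j + 1) = k + 1 + j by omega] using h2

-- ===== VERDICT (by name: the statement is the Claim_ definition above) =====
theorem win_col_spec : Claim_equal_win_col := by
  intro carton _ _
  unfold Spec_win_col win_col win_col_alt
  set n := carton.length with hn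
  have hlen : (carton.foldl (winColAltRow n) (List.replicate n 0)).length = n := by
    rw [counts_length]; simp
  rw [winColOuter_eq, winColAltScan_eq carton _ 0 ?_, hlen, ← List.range_eq_range']
  intro j hj
  rw [hlen] at hj
  rw [counts_getD n j hj carton (List.replicate n 0) (by simp)]
  simp
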